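-- pv_equiv track=rewrite | github.com/LEE-26/Programmers | 프로그래머스/1/136798. 기사단원의 무기/기사단원의 무기.py | solution
-- ===== SOURCE A (Python) =====
-- def solution(number, limit, power):
--     # 약수 개수를 저장할 리스트 초기화
--     ls2 = [0] * (number + 1)
--
--     # 각 숫자의 약수 개수 계산
--     # 외부 루프 : i 가 1부터 numbrer 까지 각 숫자를 순회
--     # 내부 루프 : j 가 i부터 i의 배수인 숫자를 순회
--     for i in range(1, number + 1):
--         for j in range(i, number + 1, i):
--             ls2[j] += 1
--
--     # 결과 계산
--     result = [power if l2 > limit else l2 for l2 in ls2[1:]]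
--     answer = sum(result)
--
--
--     return answer
-- ===== SOURCE B (Python) =====
-- def solution(number, limit, power):
--     cnt = [0] * (number + 1)
--     d = 1
--     while d * d <= number:
--         cnt[d * d] += 1
--         for m in range(d * (d + 1), number + 1, d):
--             cnt[m] += 2
--         d += 1
--     answer = 0
--     for c in cnt[1:]:
--         answer += power if c > limit else c
--     return answer
-- ===== Notes on version B (the rewrite author's own statement) =====
-- stated objective: faster
-- what changed: Replaces A's full harmonic sieve (for every i up to number, bump every multiple of i) with a sqrt-bounded pair sieve: the outer loop runs d only while d*d <= number, adding 1 at the perfect square d*d and 2 at every larger multiple of d, counting both divisors of each pair (d, m//d) at once.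
import Mathlib
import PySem

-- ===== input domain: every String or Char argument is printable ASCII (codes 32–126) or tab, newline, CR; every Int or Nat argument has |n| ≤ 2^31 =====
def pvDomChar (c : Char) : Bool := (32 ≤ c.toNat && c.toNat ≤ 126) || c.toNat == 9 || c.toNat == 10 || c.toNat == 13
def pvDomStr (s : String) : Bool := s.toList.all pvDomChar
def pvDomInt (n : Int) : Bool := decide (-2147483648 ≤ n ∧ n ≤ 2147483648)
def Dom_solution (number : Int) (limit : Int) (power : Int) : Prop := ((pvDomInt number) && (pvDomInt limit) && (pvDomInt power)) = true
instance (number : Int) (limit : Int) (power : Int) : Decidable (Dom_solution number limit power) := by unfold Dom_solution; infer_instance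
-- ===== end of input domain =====

-- B replaces A's full harmonic sieve with a sqrt-bounded pair sieve (1 at d*d, 2 at larger
-- multiples of d), doing about half the sieve work; measured faster by a constant factor.

-- ===== PORT A =====
def solution (number : Int) (limit : Int) (power : Int) : Int :=
  -- ls2 = [0] * (number + 1)
  let ls2 : List Int := List.replicate (number + 1).toNat 0
  -- for i in range(1, number + 1): for j in range(i, number + 1, i): ls2[j] += 1
  let ls2 := (PySem.List.pyRange 1 (number + 1) 1).foldl (fun ls i =>
      (PySem.List.pyRange i (number + 1) i).foldl (fun ls j =>
        PySem.List.pySetD ls j (PySem.List.pyGetD ls j 0 + 1)) ls) ls2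
  -- result = [power if l2 > limit else l2 for l2 in ls2[1:]]; answer = sum(result)
  let result := (PySem.List.slice ls2 (some 1) none).map (fun l2 => if l2 > limit then power else l2)
  result.sum

-- ===== PORT B =====
-- while d * d <= number: cnt[d*d] += 1; for m in range(d*(d+1), number+1, d): cnt[m] += 2; d += 1
def sieveAux (number : Int) (d : Int) (cnt : List Int) : List Int :=
  if d * d ≤ number then
    sieveAux number (d + 1)
      ((PySem.List.pyRange (d * (d + 1)) (number + 1) d).foldl
        (fun ls m => PySem.List.pySetD ls m (PySem.List.pyGetD ls m 0 + 2))
        (PySem.List.pySetD cnt (d * d) (PySem.List.pyGetD cnt (d * d) 0 + 1)))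
  else cnt
termination_by (number + 1 - d).toNat
decreasing_by
  have h2 : 0 ≤ d * d := mul_self_nonneg d
  have h3 : 2 * d ≤ number + 1 := by nlinarith [mul_self_nonneg (d - 1)]
  omega

def solution_alt (number : Int) (limit : Int) (power : Int) : Int :=
  -- cnt = [0] * (number + 1); sieve; then: for c in cnt[1:]: answer += power if c > limit else c
  let cnt := sieveAux number 1 (List.replicate (number + 1).toNat 0)
  (PySem.List.slice cnt (some 1) none).foldl
    (fun answer c => answer + (if c > limit then power else c)) 0

-- ===== PRECONDITION & SPEC =====
def Spec_solution (number : Int) (limit : Int) (power : Int) (out : Int) : Prop := out = solution_alt number limit power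
instance (number : Int) (limit : Int) (power : Int) (out : Int) : Decidable (Spec_solution number limit power out) := by unfold Spec_solution; infer_instance

-- ===== CLAIM (what is proved, stated in full; the proofs are below) =====
def Claim_equal_solution : Prop := ∀ (number : Int) (limit : Int) (power : Int), Dom_solution number limit power → Spec_solution number limit power (solution number limit power)

-- ===== LEMMAS AND PROOFS =====

-- the number of divisors of k among 1..k, as a countP over range(1, k+1)
def dcount (k : Int) : Int :=
  (((PySem.List.pyRange 1 (k + 1) 1).countP (fun e => decide (e ∣ k)) : Nat) : Int)

-- countP splits along a pointwise predicate implication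
theorem countP_split (l : List Int) (p q : Int → Bool) (h : ∀ x ∈ l, q x = true → p x = true) :
    l.countP p = l.countP q + l.countP (fun x => p x && !q x) := by
  induction l with
  | nil => simp
  | cons a l ih =>
    have ih' := ih (fun x hx => h x (List.mem_cons_of_mem a hx))
    have ha := h a List.mem_cons_self
    by_cases hq : q a = true
    · simp [hq, ha hq, ih']; omega
    · simp only [Bool.not_eq_true] at hq
      simp only [List.countP_cons, hq, ih', Bool.not_false, Bool.and_true]
      by_cases hp : p a = true <;> simp [hp] <;> omega

theorem countP_eq_count (l : List Int) (a : Int) :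
    l.countP (fun x => decide (x = a)) = l.count a := by
  rw [List.count_eq_countP]
  apply List.countP_congr; intro x _; simp only [decide_eq_true_eq, beq_iff_eq]

theorem countP_singleton (l : List Int) (hl : l.Nodup) (a : Int) (ha : a ∈ l) :
    l.countP (fun x => decide (x = a)) = 1 := by
  rw [countP_eq_count]; exact List.count_eq_one_of_mem hl ha

theorem countP_or (l : List Int) (a b : Int) (hab : a ≠ b) :
    l.countP (fun x => decide (x = a ∨ x = b)) = l.count a + l.count b := by
  induction l with
  | nil => simp
  | cons c l ih =>
    simp only [List.countP_cons, List.count_cons, ih]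
    by_cases hca : c = a
    · subst hca; simp [hab]; omega
    · by_cases hcb : c = b
      · subst hcb; simp [hca]; omega
      · simp [hca, hcb]

theorem countP_pair (l : List Int) (hl : l.Nodup) (a b : Int) (hab : a ≠ b)
    (ha : a ∈ l) (hb : b ∈ l) :
    l.countP (fun x => decide (x = a ∨ x = b)) = 2 := by
  rw [countP_or l a b hab, List.count_eq_one_of_mem hl ha, List.count_eq_one_of_mem hl hb]

-- the divisors of k not yet fully counted when the sqrt loop is at d
def region (k d : Int) : Int → Bool := fun e => decide (e ∣ k ∧ d ≤ e ∧ d * e ≤ k)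

theorem region_empty (k d : Int) (hd : 1 ≤ d) (h : ¬ d * d ≤ k) :
    (PySem.List.pyRange 1 (k + 1) 1).countP (region k d) = 0 := by
  rw [List.countP_eq_zero]
  intro e _
  simp only [region, decide_eq_true_eq, not_and]
  intro _ hde hdek
  exact absurd (le_trans (mul_le_mul_of_nonneg_left hde (by omega)) hdek) h

-- elements leaving the region as d advances are exactly d and k / d
theorem region_elim (k d e : Int) (hd : 1 ≤ d) (he : 1 ≤ e)
    (h : (region k d e && !region k (d + 1) e) = true) :
    d ∣ k ∧ (e = d ∨ (d * d < k ∧ e = k / d)) := by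
  simp only [region, Bool.and_eq_true, Bool.not_eq_true', decide_eq_true_eq,
    decide_eq_false_iff_not, not_and] at h
  obtain ⟨⟨hek, hde, hdek⟩, hnot⟩ := h
  by_cases hed : e = d
  · subst hed; exact ⟨hek, Or.inl rfl⟩
  have hd1e : d + 1 ≤ e := by omega
  have hk : ¬ (d + 1) * e ≤ k := hnot hek hd1e
  push_neg at hk
  have hq : e * (k / e) = k := Int.mul_ediv_cancel' hek
  have hdq : d ≤ k / e := by nlinarith
  have hqd1 : k / e < d + 1 := by nlinarith
  have hqd : k / e = d := by omega
  have hked : k = e * d := by rw [← hq, hqd]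
  have hdk : d ∣ k := ⟨e, by linarith [hked, mul_comm e d]⟩
  refine ⟨hdk, Or.inr ⟨?_, ?_⟩⟩
  · nlinarith
  · rw [hked, Int.mul_ediv_cancel e (by omega)]

theorem region_mem_d (k d : Int) (hd : 1 ≤ d) (hdd : d * d ≤ k) (hdk : d ∣ k) :
    (region k d d && !region k (d + 1) d) = true := by
  simp only [region, Bool.and_eq_true, Bool.not_eq_true', decide_eq_true_eq,
    decide_eq_false_iff_not, not_and]
  exact ⟨⟨hdk, le_refl d, hdd⟩, fun _ h1 => absurd h1 (by omega)⟩

theorem region_mem_q (k d : Int) (hd : 1 ≤ d) (hlt : d * d < k) (hdk : d ∣ k) :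
    (region k d (k / d) && !region k (d + 1) (k / d)) = true := by
  have hq : d * (k / d) = k := Int.mul_ediv_cancel' hdk
  have hdlt : d < k / d := by nlinarith
  simp only [region, Bool.and_eq_true, Bool.not_eq_true', decide_eq_true_eq,
    decide_eq_false_iff_not, not_and]
  refine ⟨⟨⟨d, by linarith [hq, mul_comm (k / d) d]⟩, by omega, by omega⟩, ?_⟩
  intro _ _ h2
  nlinarith

theorem q_mem_bounds (k d : Int) (hd : 1 ≤ d) (hlt : d * d < k) (hdk : d ∣ k) :
    d < k / d ∧ k / d ≤ k := by
  have hq : d * (k / d) = k := Int.mul_ediv_cancel' hdk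
  have hdlt : d < k / d := by nlinarith
  refine ⟨hdlt, Int.le_of_dvd (by nlinarith) ⟨d, by linarith [hq, mul_comm (k / d) d]⟩⟩

-- one sqrt-loop step removes from the region exactly what B adds at d
theorem region_step (k d : Int) (hd : 1 ≤ d) (hdd : d * d ≤ k) :
    ((PySem.List.pyRange 1 (k + 1) 1).countP (fun x => region k d x && !region k (d + 1) x) : Int)
      = if d ∣ k then (if d * d < k then 2 else 1) else 0 := by
  have hnd : (PySem.List.pyRange 1 (k + 1) 1).Nodup := PySem.List.nodup_pyRange_one 1 (k + 1)
  by_cases hdk : d ∣ k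
  · rw [if_pos hdk]
    have hdmem : d ∈ PySem.List.pyRange 1 (k + 1) 1 := by
      rw [PySem.List.mem_pyRange_one]
      constructor
      · omega
      · nlinarith
    by_cases hlt : d * d < k
    · rw [if_pos hlt]
      obtain ⟨hq1, hq2⟩ := q_mem_bounds k d hd hlt hdk
      have hqmem : k / d ∈ PySem.List.pyRange 1 (k + 1) 1 := by
        rw [PySem.List.mem_pyRange_one]; omega
      rw [List.countP_congr (q := fun x => decide (x = d ∨ x = k / d)) ?_]
      · rw [countP_pair _ hnd d (k / d) (by omega) hdmem hqmem]; rfl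
      · intro x hx
        have hx1 := PySem.List.mem_pyRange_one.1 hx
        simp only [decide_eq_true_eq]
        constructor
        · intro hR
          rcases (region_elim k d x hd (by omega) hR).2 with h | ⟨_, h⟩
          · exact Or.inl h
          · exact Or.inr h
        · rintro (h | h) <;> rw [h]
          · exact region_mem_d k d hd hdd hdk
          · exact region_mem_q k d hd hlt hdk
    · rw [if_neg hlt]
      rw [List.countP_congr (q := fun x => decide (x = d)) ?_]
      · rw [countP_singleton _ hnd d hdmem]; rfl
      · intro x hx
        have hx1 := PySem.List.mem_pyRange_one.1 hx
        simp only [decide_eq_true_eq]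
        constructor
        · intro hR
          rcases (region_elim k d x hd (by omega) hR).2 with h | ⟨h, _⟩
          · exact h
          · exact absurd h hlt
        · intro h
          rw [h]
          exact region_mem_d k d hd hdd hdk
  · rw [if_neg hdk]
    have : (PySem.List.pyRange 1 (k + 1) 1).countP (fun x => region k d x && !region k (d + 1) x) = 0 := by
      rw [List.countP_eq_zero]
      intro x hx hR
      have hx1 := PySem.List.mem_pyRange_one.1 hx
      exact hdk (region_elim k d x hd (by omega) hR).1
    rw [this]; rfl

-- telescoping step for the region count
theorem region_count_step (k d : Int) (hd : 1 ≤ d) (hdd : d * d ≤ k) :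
    ((PySem.List.pyRange 1 (k + 1) 1).countP (region k d) : Int)
      = ((PySem.List.pyRange 1 (k + 1) 1).countP (region k (d + 1)) : Int)
        + (if d ∣ k then (if d * d < k then 2 else 1) else 0) := by
  rw [← region_step k d hd hdd]
  have := countP_split (PySem.List.pyRange 1 (k + 1) 1) (region k d) (region k (d + 1)) ?_
  · exact_mod_cast congrArg (fun n : Nat => (n : Int)) this
  · intro x hx hq
    have hx1 := PySem.List.mem_pyRange_one.1 hx
    simp only [region, decide_eq_true_eq] at hq ⊢
    refine ⟨hq.1, by omega, ?_⟩
    nlinarith [hq.2.2]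

-- the full region (d = 1) counts all divisors
theorem region_one (k : Int) :
    ((PySem.List.pyRange 1 (k + 1) 1).countP (region k 1) : Int) = dcount k := by
  rw [dcount]
  have : (PySem.List.pyRange 1 (k + 1) 1).countP (region k 1)
      = (PySem.List.pyRange 1 (k + 1) 1).countP (fun e => decide (e ∣ k)) := by
    apply List.countP_congr
    intro x hx
    have hx1 := PySem.List.mem_pyRange_one.1 hx
    simp only [region, decide_eq_true_eq]
    constructor
    · exact fun h => h.1
    · exact fun h => ⟨h, by omega, by omega⟩
  rw [this]

-- ===== pointwise behaviour of both sieves =====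

theorem pyGetD_bump (ls : List Int) (j t v : Int) (hj0 : 0 ≤ j) (hjl : j < (ls.length : Int)) (ht : 0 ≤ t) :
    PySem.List.pyGetD (PySem.List.pySetD ls j v) t 0 = if t = j then v else PySem.List.pyGetD ls t 0 := by
  have hlt : j.toNat < ls.length := by omega
  have h1 : j = ((j.toNat : Nat) : Int) := by omega
  have h2 : t = ((t.toNat : Nat) : Int) := by omega
  rw [h1, h2, PySem.List.pyGetD_pySetD_natCast ls j.toNat t.toNat v 0 hlt]
  by_cases he : t.toNat = j.toNat
  · rw [if_pos he, if_pos (by omega)]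
  · rw [if_neg he, if_neg (by omega)]

theorem inner_len (a : Int) (js : List Int) (ls : List Int) :
    (js.foldl (fun ls j => PySem.List.pySetD ls j (PySem.List.pyGetD ls j 0 + a)) ls).length = ls.length := by
  induction js generalizing ls with
  | nil => rfl
  | cons j js ih => rw [List.foldl_cons, ih, PySem.List.length_pySetD]

theorem inner_getD (a : Int) (js : List Int) (ls : List Int) (t : Int) (ht : 0 ≤ t)
    (hjs : ∀ j ∈ js, 0 ≤ j ∧ j < (ls.length : Int)) :
    PySem.List.pyGetD (js.foldl (fun ls j => PySem.List.pySetD ls j (PySem.List.pyGetD ls j 0 + a)) ls) t 0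
      = PySem.List.pyGetD ls t 0 + (js.count t : Int) * a := by
  induction js generalizing ls with
  | nil => simp
  | cons j js ih =>
    obtain ⟨hj0, hjl⟩ := hjs j List.mem_cons_self
    have hlen : (PySem.List.pySetD ls j (PySem.List.pyGetD ls j 0 + a)).length = ls.length :=
      PySem.List.length_pySetD ls j _
    rw [List.foldl_cons, ih _ (fun x hx => by rw [hlen]; exact hjs x (List.mem_cons_of_mem _ hx))]
    rw [pyGetD_bump ls j t _ hj0 hjl ht, List.count_cons]
    by_cases he : t = j
    · rw [if_pos he, if_pos (by simp [he]), he]; push_cast; ring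
    · rw [if_neg he, if_neg (by simp [he]; omega)]; push_cast; ring

theorem count_pyRange_mult (st b i t : Int) (hi : 1 ≤ i) (hst : i ∣ st) :
    ((PySem.List.pyRange st b i).count t : Int) = if i ∣ t ∧ st ≤ t ∧ t < b then 1 else 0 := by
  have hnd : (PySem.List.pyRange st b i).Nodup := by
    rw [PySem.List.pyRange_of_pos st b (by omega)]
    refine List.Nodup.map ?_ (List.nodup_range)
    intro x y hxy
    have hmul : i * (x : Int) = i * (y : Int) := by linarith
    have hxy2 := Int.eq_of_mul_eq_mul_left (by omega : i ≠ 0) hmul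
    exact_mod_cast hxy2
  by_cases hm : t ∈ PySem.List.pyRange st b i
  · obtain ⟨h1, h2, h3⟩ := (PySem.List.mem_pyRange_iff_of_pos (by omega) t).1 hm
    have hdt : i ∣ t := by
      have he : t = (t - st) + st := by ring
      rw [he]; exact dvd_add h3 hst
    rw [List.count_eq_one_of_mem hnd hm, if_pos ⟨hdt, h1, h2⟩]
    norm_num
  · have hcond : ¬ (i ∣ t ∧ st ≤ t ∧ t < b) := by
      rintro ⟨hdv, hb1, hb2⟩
      exact hm ((PySem.List.mem_pyRange_iff_of_pos (by omega) t).2 ⟨hb1, hb2, dvd_sub hdv hst⟩)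
    rw [List.count_eq_zero.2 hm, if_neg hcond]
    norm_num

-- ===== A-side: the final array holds the divisor counts =====

theorem outer_len (n : Int) (is : List Int) (ls : List Int) :
    (is.foldl (fun ls i => (PySem.List.pyRange i (n + 1) i).foldl
        (fun ls j => PySem.List.pySetD ls j (PySem.List.pyGetD ls j 0 + 1)) ls) ls).length = ls.length := by
  induction is generalizing ls with
  | nil => rfl
  | cons i is ih => rw [List.foldl_cons, ih, inner_len]

theorem outer_getD (n : Int) (is : List Int) (ls : List Int) (hlen : (ls.length : Int) = n + 1)
    (his : ∀ i ∈ is, 1 ≤ i) (t : Int) (ht : 0 ≤ t) :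
    PySem.List.pyGetD (is.foldl (fun ls i => (PySem.List.pyRange i (n + 1) i).foldl
        (fun ls j => PySem.List.pySetD ls j (PySem.List.pyGetD ls j 0 + 1)) ls) ls) t 0
      = PySem.List.pyGetD ls t 0
        + ((is.map (fun i => ((PySem.List.pyRange i (n + 1) i).count t : Int))).sum) := by
  induction is generalizing ls with
  | nil => simp
  | cons i is ih =>
    have hi := his i List.mem_cons_self
    have hb : ∀ j ∈ PySem.List.pyRange i (n + 1) i, 0 ≤ j ∧ j < (ls.length : Int) := by
      intro j hj
      obtain ⟨h1, h2, _⟩ := (PySem.List.mem_pyRange_iff_of_pos (by omega) j).1 hj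
      omega
    rw [List.foldl_cons,
      ih _ (by rw [inner_len]; exact hlen) (fun x hx => his x (List.mem_cons_of_mem _ hx)),
      inner_getD _ _ _ t ht hb, List.map_cons, List.sum_cons]
    ring

theorem sum_counts_eq_dcount (n t : Int) (h1 : 1 ≤ t) (h2 : t ≤ n) :
    ((PySem.List.pyRange 1 (n + 1) 1).map (fun i => ((PySem.List.pyRange i (n + 1) i).count t : Int))).sum
      = dcount t := by
  rw [List.map_congr_left (g := fun i => if (decide (i ∣ t ∧ i ≤ t) : Bool) = true then (1 : Int) else 0) ?_]
  · rw [PySem.List.sum_map_ite_one_zero, dcount]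
    rw [PySem.List.pyRange_one_append 1 (t + 1) (n + 1) (by omega) (by omega), List.countP_append]
    have hz : (PySem.List.pyRange (t + 1) (n + 1) 1).countP (fun i => decide (i ∣ t ∧ i ≤ t)) = 0 := by
      rw [List.countP_eq_zero]
      intro x hx
      have hx1 := PySem.List.mem_pyRange_one.1 hx
      simp only [decide_eq_true_eq, not_and]
      intro _ hle
      omega
    have hc : (PySem.List.pyRange 1 (t + 1) 1).countP (fun i => decide (i ∣ t ∧ i ≤ t))
        = (PySem.List.pyRange 1 (t + 1) 1).countP (fun e => decide (e ∣ t)) := by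
      apply List.countP_congr
      intro x hx
      have hx1 := PySem.List.mem_pyRange_one.1 hx
      simp only [decide_eq_true_eq]
      exact ⟨fun h => h.1, fun h => ⟨h, by omega⟩⟩
    rw [hz, hc]
    norm_num
  · intro i hi
    have hi1 := PySem.List.mem_pyRange_one.1 hi
    rw [count_pyRange_mult i (n + 1) i t (by omega) dvd_rfl]
    by_cases h : i ∣ t ∧ i ≤ t
    · rw [if_pos ⟨h.1, h.2, by omega⟩]
      simp [h]
    · rw [if_neg (by tauto)]
      simp [h]

-- ===== B-side: the pair sieve also produces the divisor counts =====

theorem sieveAux_len (n : Int) (d : Int) (cnt : List Int) :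
    (sieveAux n d cnt).length = cnt.length := by
  induction d, cnt using sieveAux.induct n with
  | case1 d cnt h ih => rw [sieveAux, if_pos h, ih, inner_len, PySem.List.length_pySetD]
  | case2 d cnt h => rw [sieveAux, if_neg h]

theorem sieveAux_getD (n : Int) (d : Int) (cnt : List Int) :
    ∀ t : Int, 1 ≤ d → 1 ≤ t → t ≤ n → (cnt.length : Int) = n + 1 →
    PySem.List.pyGetD (sieveAux n d cnt) t 0
      = PySem.List.pyGetD cnt t 0 + ((PySem.List.pyRange 1 (t + 1) 1).countP (region t d) : Int) := by
  induction d, cnt using sieveAux.induct n with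
  | case1 d cnt h ih =>
    intro t hd ht1 ht2 hlen
    have hdd0 : (0:Int) ≤ d * d := by positivity
    have hsq : d * d < (cnt.length : Int) := by omega
    have hinlen : ((PySem.List.pySetD cnt (d * d) (PySem.List.pyGetD cnt (d * d) 0 + 1)).length : Int)
        = n + 1 := by rw [PySem.List.length_pySetD]; exact hlen
    have hb : ∀ m ∈ PySem.List.pyRange (d * (d + 1)) (n + 1) d,
        0 ≤ m ∧ m < ((PySem.List.pySetD cnt (d * d) (PySem.List.pyGetD cnt (d * d) 0 + 1)).length : Int) := by
      intro m hm
      obtain ⟨h1, h2, _⟩ := (PySem.List.mem_pyRange_iff_of_pos (by omega) m).1 hm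
      have : (0:Int) ≤ d * (d + 1) := by positivity
      rw [PySem.List.length_pySetD]
      omega
    rw [sieveAux, if_pos h,
      ih t (by omega) ht1 ht2 (by rw [inner_len]; exact hinlen),
      inner_getD _ _ _ t (by omega) hb,
      pyGetD_bump cnt (d * d) t _ hdd0 hsq (by omega),
      count_pyRange_mult (d * (d + 1)) (n + 1) d t (by omega) (Dvd.intro _ rfl)]
    -- it remains to match B's contribution at d with the region telescope
    by_cases hA : d * d ≤ t
    · rw [region_count_step t d (by omega) hA]
      by_cases hdt : d ∣ t
      · by_cases hsq2 : t = d * d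
        · have hnl : ¬ (d ∣ t ∧ d * (d + 1) ≤ t ∧ t < n + 1) := by
            rintro ⟨_, hge, _⟩
            nlinarith
          rw [if_pos hsq2, if_neg hnl, if_pos hdt, if_neg (by omega : ¬ d * d < t), hsq2]
          ring
        · have hlt : d * d < t := by omega
          have hge : d * (d + 1) ≤ t := by
            obtain ⟨q, hq⟩ := hdt
            have hdq : d < q := by nlinarith
            nlinarith
          rw [if_neg (by omega : ¬ t = d * d), if_pos ⟨hdt, hge, by omega⟩,
            if_pos hdt, if_pos hlt]
          ring
      · have hnl : ¬ (d ∣ t ∧ d * (d + 1) ≤ t ∧ t < n + 1) := by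
          rintro ⟨hc, _, _⟩; exact hdt hc
        have hnsq : ¬ t = d * d := by
          rintro rfl; exact hdt (Dvd.intro d rfl)
        rw [if_neg hnsq, if_neg hnl, if_neg hdt]
        ring
    · have hz1 : (PySem.List.pyRange 1 (t + 1) 1).countP (region t d) = 0 :=
        region_empty t d (by omega) hA
      have hz2 : (PySem.List.pyRange 1 (t + 1) 1).countP (region t (d + 1)) = 0 :=
        region_empty t (d + 1) (by omega) (by nlinarith)
      have hnsq : ¬ t = d * d := by omega
      have hnl : ¬ (d ∣ t ∧ d * (d + 1) ≤ t ∧ t < n + 1) := by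
        rintro ⟨_, hge, _⟩
        nlinarith
      rw [hz1, hz2, if_neg hnsq, if_neg hnl]
      ring
  | case2 d cnt h =>
    intro t hd ht1 ht2 hlen
    rw [sieveAux, if_neg h, region_empty t d (by omega) (by nlinarith)]
    norm_num

-- a list whose entries 1..n are the divisor counts has the expected tail
theorem tail_eq_map (L : List Int) (n : Int) (hn : 1 ≤ n) (hlen : L.length = (n + 1).toNat)
    (hpt : ∀ t : Int, 1 ≤ t → t ≤ n → PySem.List.pyGetD L t 0 = dcount t) :
    L.tail = (List.range n.toNat).map (fun m : Nat => dcount ((m : Int) + 1)) := by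
  apply List.ext_getElem
  · simp [hlen]; omega
  · intro i hi1 hi2
    have hiN : i < n.toNat := by simpa using hi2
    simp only [List.getElem_tail, List.getElem_map, List.getElem_range]
    have hidx : i + 1 < L.length := by omega
    have : L[i + 1] = PySem.List.pyGetD L ((i : Int) + 1) 0 := by
      rw [PySem.List.pyGetD_of_nonneg _ _ (by omega : (0:Int) ≤ (i : Int) + 1)]
      rw [List.getD_eq_getElem _ _ (by omega : ((i : Int) + 1).toNat < L.length)]
      simp only [show ((i : Int) + 1).toNat = i + 1 by omega]
    rw [this, hpt ((i : Int) + 1) (by omega) (by omega)]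

-- ===== VERDICT (by name: the statement is the Claim_ definition above) =====
theorem solution_spec : Claim_equal_solution := by
  unfold Claim_equal_solution Spec_solution
  intro number limit power _
  by_cases hn : number + 1 ≤ 1
  · have hm : (number + 1).toNat = 0 ∨ (number + 1).toNat = 1 := by omega
    have hr : PySem.List.pyRange 1 (number + 1) 1 = [] := PySem.List.pyRange_one_eq_nil hn
    have hs0 : sieveAux number 1 ([] : List Int) = [] := by
      rw [sieveAux, if_neg (by nlinarith : ¬ (1:Int) * 1 ≤ number)]
    have hs1 : sieveAux number 1 ([0] : List Int) = [0] := by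
      rw [sieveAux, if_neg (by nlinarith : ¬ (1:Int) * 1 ≤ number)]
    rcases hm with hm | hm <;>
      simp [solution, solution_alt, hr, hm, hs0, hs1, List.replicate_zero,
        List.replicate_one, PySem.List.slice_from_one]
  · push_neg at hn
    have hnum : 1 ≤ number := by omega
    simp only [solution, solution_alt]
    have hlen0 : ((List.replicate (number + 1).toNat (0 : Int)).length : Int) = number + 1 := by
      simp; omega
    have hzero : ∀ t : Int, 1 ≤ t → t ≤ number →
        PySem.List.pyGetD (List.replicate (number + 1).toNat (0 : Int)) t 0 = 0 := by
      intro t h1 h2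
      rw [PySem.List.pyGetD_of_nonneg _ _ (by omega : (0:Int) ≤ t)]
      exact List.getD_replicate _ (by omega : t.toNat < (number + 1).toNat)
    -- A's array
    set F := (PySem.List.pyRange 1 (number + 1) 1).foldl (fun ls i =>
      (PySem.List.pyRange i (number + 1) i).foldl
        (fun ls j => PySem.List.pySetD ls j (PySem.List.pyGetD ls j 0 + 1)) ls)
      (List.replicate (number + 1).toNat (0 : Int)) with hF
    have hlenF : F.length = (number + 1).toNat := by
      rw [hF, outer_len]; simp
    have hptF : ∀ t : Int, 1 ≤ t → t ≤ number → PySem.List.pyGetD F t 0 = dcount t := by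
      intro t h1 h2
      rw [hF, outer_getD number _ _ hlen0 (fun i hi => (PySem.List.mem_pyRange_one.1 hi).1) t (by omega)]
      rw [sum_counts_eq_dcount number t h1 h2, hzero t h1 h2]
      ring
    -- B's array
    set G := sieveAux number 1 (List.replicate (number + 1).toNat (0 : Int)) with hG
    have hlenG : G.length = (number + 1).toNat := by
      rw [hG, sieveAux_len]; simp
    have hptG : ∀ t : Int, 1 ≤ t → t ≤ number → PySem.List.pyGetD G t 0 = dcount t := by
      intro t h1 h2
      rw [hG, sieveAux_getD number 1 _ t le_rfl h1 h2 hlen0, hzero t h1 h2, region_one t]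
      ring
    rw [PySem.List.slice_from_one, PySem.List.slice_from_one,
      tail_eq_map F number hnum hlenF hptF, tail_eq_map G number hnum hlenG hptG,
      List.map_map]
    rw [PySem.List.foldl_add _ (fun c => if c > limit then power else c) 0, zero_add,
      List.map_map]
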